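-- pv_equiv track=rewrite | github.com/Hanno1/AdventOfCode2023 | 14_2023.py | move_stones_west
-- ===== SOURCE A (Python) =====
-- def move_stones_west(round_stones, square_stones, rows, cols):
--     first_empty_tile = [-1 for _ in range(rows)]
--     new_round_stones = []
--     for col in range(cols):
--         for row in range(rows):
--             if (row, col) in square_stones:
--                 first_empty_tile[row] = -1
--             elif (row, col) in round_stones:
--                 if first_empty_tile[row] != -1:
--                     # move stone to first empty tile
--                     new_round_stones.append((row, first_empty_tile[row]))
--                     first_empty_tile[row] += 1
--                 else:
--                     # dont move
--                     new_round_stones.append((row, col))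
--             else:
--                 if first_empty_tile[row] == -1:
--                     first_empty_tile[row] = col
--     return new_round_stones
-- ===== SOURCE B (Python) =====
-- def move_stones_west(round_stones, square_stones, rows, cols):
--     sq = set(square_stones)
--     stones = {(r, c) for (r, c) in round_stones
--               if 0 <= r < rows and 0 <= c < cols and (r, c) not in sq}
--     out = []
--     for (c, r) in sorted((c, r) for (r, c) in stones):
--         s = max((sc for (sr, sc) in sq if sr == r and 0 <= sc < c), default=-1)
--         k = sum(1 for (rr, cc) in stones if rr == r and s < cc < c)
--         out.append((r, s + 1 + k))
--     return out
-- ===== Notes on version B (the rewrite author's own statement) =====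
-- stated objective: faster
-- what changed: A sweeps every cell of the rows*cols grid column by column with a list-membership test per cell while threading a per-row first-empty-tile state; B never scans the grid: it computes each stone's destination in closed form (nearest blocking square to the west plus the stones packed in front of it) directly from the stone/square lists and emits the stones sorted by (column, row).
import Mathlib
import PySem

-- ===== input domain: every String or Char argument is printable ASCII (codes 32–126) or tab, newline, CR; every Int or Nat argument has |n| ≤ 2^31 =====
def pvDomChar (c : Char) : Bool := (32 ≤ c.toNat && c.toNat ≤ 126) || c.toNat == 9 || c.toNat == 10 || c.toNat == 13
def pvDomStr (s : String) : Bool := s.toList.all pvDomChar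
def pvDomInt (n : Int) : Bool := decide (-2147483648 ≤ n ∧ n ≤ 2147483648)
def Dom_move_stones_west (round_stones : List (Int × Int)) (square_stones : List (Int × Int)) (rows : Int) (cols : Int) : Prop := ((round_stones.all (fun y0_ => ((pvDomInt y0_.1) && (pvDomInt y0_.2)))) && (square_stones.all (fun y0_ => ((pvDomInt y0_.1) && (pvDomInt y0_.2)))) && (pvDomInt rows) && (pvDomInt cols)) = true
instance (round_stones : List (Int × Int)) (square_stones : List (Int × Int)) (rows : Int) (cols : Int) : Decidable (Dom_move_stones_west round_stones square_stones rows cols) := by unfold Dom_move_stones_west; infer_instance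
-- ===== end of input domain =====

-- B replaces A's column-by-column sweep over the whole rows×cols grid (with a list
-- membership test per cell) by a closed-form destination per stone — last blocking
-- square plus stones packed in front — over the stones only, sorted by (col, row);
-- objective: faster (grid scans disappear).

-- ===== PORT A =====
-- Python's list first_empty_tile (indexed by row; rows visited are exactly 0..rows-1)
-- is ported as a function on row indices; the in-place element updates are pointwise
-- function updates (exact).
def pvStepA (round_stones square_stones : List (Int × Int)) (col : Int)
    (st : (Int → Int) × List (Int × Int)) (row : Int) : (Int → Int) × List (Int × Int) :=
  if (row, col) ∈ square_stones then ((fun r' => if r' = row then -1 else st.1 r'), st.2)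
  else if (row, col) ∈ round_stones then
    (if st.1 row ≠ -1 then
      ((fun r' => if r' = row then st.1 row + 1 else st.1 r'), st.2 ++ [(row, st.1 row)])
     else (st.1, st.2 ++ [(row, col)]))
  else (if st.1 row = -1 then ((fun r' => if r' = row then col else st.1 r'), st.2) else st)

def move_stones_west (round_stones : List (Int × Int)) (square_stones : List (Int × Int)) (rows : Int) (cols : Int) : List (Int × Int) :=
  ((PySem.List.pyRange 0 cols).foldl
    (fun st col => (PySem.List.pyRange 0 rows).foldl (pvStepA round_stones square_stones col) st)
    ((fun _ => -1), [])).2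

-- ===== PORT B =====
-- sq = set(square_stones)
def pvSq (square_stones : List (Int × Int)) : PySem.Set (Int × Int) :=
  PySem.Set.ofList square_stones

-- stones = {(r, c) for (r, c) in round_stones if in grid and not a square}
def pvStones (round_stones square_stones : List (Int × Int)) (rows cols : Int) : PySem.Set (Int × Int) :=
  PySem.Set.ofList (round_stones.filter (fun p =>
    decide (0 ≤ p.1) && decide (p.1 < rows) && decide (0 ≤ p.2) && decide (p.2 < cols) &&
    !(PySem.Set.contains (pvSq square_stones) p)))

-- s = max((sc for (sr, sc) in sq if sr == r and 0 <= sc < c), default=-1)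
def pvS (sq : List (Int × Int)) (r c : Int) : Int :=
  PySem.List.maxD ((sq.filter (fun p => p.1 == r && decide (0 ≤ p.2) && decide (p.2 < c))).map
    (fun p => p.2)) (fun x => x) (-1)

-- k = sum(1 for (rr, cc) in stones if rr == r and s < cc < c)   (a sum of ones is a count)
def pvK (stones : List (Int × Int)) (r s c : Int) : Int :=
  (stones.countP (fun p => p.1 == r && decide (s < p.2) && decide (p.2 < c)) : Int)

def pvDest (sq stones : List (Int × Int)) (r c : Int) : Int :=
  pvS sq r c + 1 + pvK stones r (pvS sq r c) c

def move_stones_west_alt (round_stones : List (Int × Int)) (square_stones : List (Int × Int)) (rows : Int) (cols : Int) : List (Int × Int) :=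
  (PySem.List.sorted2 ((pvStones round_stones square_stones rows cols).map (fun p => (p.2, p.1)))
      (fun q => q.1) (fun q => q.2)).map
    (fun q => (q.2, pvDest (pvSq square_stones) (pvStones round_stones square_stones rows cols) q.2 q.1))

-- ===== PRECONDITION & SPEC =====
def Spec_move_stones_west (round_stones : List (Int × Int)) (square_stones : List (Int × Int)) (rows : Int) (cols : Int) (out : List (Int × Int)) : Prop := out = move_stones_west_alt round_stones square_stones rows cols
instance (round_stones : List (Int × Int)) (square_stones : List (Int × Int)) (rows : Int) (cols : Int) (out : List (Int × Int)) : Decidable (Spec_move_stones_west round_stones square_stones rows cols out) := by unfold Spec_move_stones_west; infer_instance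

-- ===== CLAIM (what is proved, stated in full; the proofs are below) =====
def Claim_equal_move_stones_west : Prop := ∀ (round_stones : List (Int × Int)) (square_stones : List (Int × Int)) (rows : Int) (cols : Int), Dom_move_stones_west round_stones square_stones rows cols → Spec_move_stones_west round_stones square_stones rows cols (move_stones_west round_stones square_stones rows cols)

-- ===== LEMMAS AND PROOFS =====

lemma pvS_spec (l : List (Int × Int)) (r c : Int) :
    (pvS l r c = -1 ∨ ((r, pvS l r c) ∈ l ∧ 0 ≤ pvS l r c ∧ pvS l r c < c)) ∧
    (∀ p ∈ l, p.1 = r → 0 ≤ p.2 → p.2 < c → p.2 ≤ pvS l r c) := by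
  unfold pvS PySem.List.maxD
  rcases hm : PySem.List.max? ((l.filter (fun p => p.1 == r && decide (0 ≤ p.2) && decide (p.2 < c))).map (fun p => p.2)) (fun x => x) with _ | m
  · have hnil := (PySem.List.max?_eq_none_iff _ _).mp hm
    constructor
    · left; rw [hm]; rfl
    · intro p hp h1 h2 h3
      exfalso
      have : p.2 ∈ (l.filter (fun p => p.1 == r && decide (0 ≤ p.2) && decide (p.2 < c))).map (fun p => p.2) := by
        simp only [List.mem_map, List.mem_filter]
        exact ⟨p, ⟨hp, by simp [h1, h2, h3]⟩, rfl⟩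
      rw [hnil] at this; simp at this
  · rw [hm]
    have hmem := PySem.List.max?_mem hm
    have hmax := PySem.List.max?_isMax hm
    simp only [List.mem_map, List.mem_filter, Bool.and_eq_true, decide_eq_true_eq, beq_iff_eq] at hmem
    obtain ⟨p, ⟨hp, hco⟩, hpe⟩ := hmem
    obtain ⟨⟨hr, h0⟩, hlt⟩ := hco
    constructor
    · right
      simp only [Option.getD_some]
      refine ⟨?_, by omega, by omega⟩
      have hpm : p = (r, m) := by
        obtain ⟨p1, p2⟩ := p
        simp only at hr hpe
        rw [hr, hpe]
      rwa [hpm] at hp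
    · intro q hq h1 h2 h3
      simp only [Option.getD_some]
      exact hmax q.2 (by simp only [List.mem_map, List.mem_filter]; exact ⟨q, ⟨hq, by simp [h1, h2, h3]⟩, rfl⟩)


lemma pvS_ge (l : List (Int × Int)) (r c : Int) : -1 ≤ pvS l r c := by
  rcases (pvS_spec l r c).1 with h | h <;> omega

lemma pvS_lt (l : List (Int × Int)) (r c : Int) (hc : 0 ≤ c) : pvS l r c < c := by
  rcases (pvS_spec l r c).1 with h | h <;> omega

lemma pvS_square (l : List (Int × Int)) (r c : Int) (hm : (r, c) ∈ l) (hc : 0 ≤ c) :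
    pvS l r (c + 1) = c := by
  obtain ⟨hAtt, hUB⟩ := pvS_spec l r (c + 1)
  have h1 := hUB (r, c) hm rfl hc (by omega)
  rcases hAtt with h | h <;> simp at h1 <;> omega

lemma pvS_skip (l : List (Int × Int)) (r c : Int) (hm : (r, c) ∉ l) :
    pvS l r (c + 1) = pvS l r c := by
  obtain ⟨hAtt, hUB⟩ := pvS_spec l r (c + 1)
  obtain ⟨hAtt', hUB'⟩ := pvS_spec l r c
  have hle : pvS l r c ≤ pvS l r (c + 1) := by
    rcases hAtt' with h | h
    · rcases hAtt with h' | h' <;> omega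
    · exact hUB (r, pvS l r c) h.1 rfl h.2.1 (by omega)
  have hge : pvS l r (c + 1) ≤ pvS l r c := by
    rcases hAtt with h | h
    · rcases hAtt' with h' | h' <;> omega
    · have hne : pvS l r (c + 1) ≠ c := by
        intro he; rw [he] at h; exact hm h.1
      exact hUB' (r, pvS l r (c + 1)) h.1 rfl h.2.1 (by omega)
  omega

lemma pvK_empty (l : List (Int × Int)) (r c : Int) : pvK l r c (c + 1) = 0 := by
  unfold pvK
  rw [List.countP_eq_zero.mpr]
  · rfl
  · intro p hp hcon
    simp only [Bool.and_eq_true, decide_eq_true_eq, beq_iff_eq] at hcon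
    omega

lemma pvK_step (l : List (Int × Int)) (hl : l.Nodup) (r s c : Int) (hs : s < c) :
    pvK l r s (c + 1) = pvK l r s c + (if (r, c) ∈ l then 1 else 0) := by
  unfold pvK
  induction l with
  | nil => simp
  | cons a t ih =>
    rw [List.nodup_cons] at hl
    have iht := ih hl.2
    rw [List.countP_cons, List.countP_cons]
    by_cases ha : a = (r, c)
    · subst ha
      have h1 : ((r, c).1 == r && decide (s < (r, c).2) && decide ((r, c).2 < c + 1)) = true := by
        have hlt : ((r, c).2 < c + 1) := by omega
        simp [hs, hlt]
      have h2 : ((r, c).1 == r && decide (s < (r, c).2) && decide ((r, c).2 < c)) = false := by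
        simp
      have hmemc : (r, c) ∈ (r, c) :: t := List.mem_cons_self ..
      simp only [h1, h2, if_true, if_false]
      rw [if_pos hmemc]
      rw [if_neg hl.1] at iht
      push_cast at iht ⊢
      omega
    · have hmem : ((r, c) ∈ a :: t) = ((r, c) ∈ t) := by
        simp only [List.mem_cons, eq_self_iff_true]
        refine propext ⟨fun h => ?_, Or.inr⟩
        rcases h with h | h
        · exact absurd h.symm ha
        · exact h
      have heq : (a.1 == r && decide (s < a.2) && decide (a.2 < c + 1)) = (a.1 == r && decide (s < a.2) && decide (a.2 < c)) := by
        rcases eq_or_ne a.1 r with h | h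
        · have h2 : a.2 ≠ c := by
            intro hc2
            apply ha
            obtain ⟨a1, a2⟩ := a
            simp only at h hc2
            rw [h, hc2]
          have h3 : (decide (a.2 < c + 1)) = (decide (a.2 < c)) := decide_eq_decide.mpr (by omega)
          rw [h3]
        · have hfa : (a.1 == r) = false := beq_eq_false_iff_ne.mpr h
          rw [hfa, Bool.false_and, Bool.false_and, Bool.false_and]
      rw [heq]
      simp only [hmem]
      by_cases hm2 : (r, c) ∈ t
      · rw [if_pos hm2] at iht ⊢; push_cast at iht ⊢; omega
      · rw [if_neg hm2] at iht ⊢; push_cast at iht ⊢; omega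


lemma pvK_le (l : List (Int × Int)) (hl : l.Nodup) (r s c : Int) (hs : s < c) :
    pvK l r s c ≤ c - s - 1 := by
  unfold pvK
  rw [List.countP_eq_length_filter]
  set F := l.filter (fun p => p.1 == r && decide (s < p.2) && decide (p.2 < c)) with hF
  have hFnd : F.Nodup := hl.filter _
  have hmap : (F.map Prod.snd).Nodup := by
    refine List.Nodup.map_on ?_ hFnd
    intro p hp q hq he
    have hp' := (List.mem_filter.mp hp).2
    have hq' := (List.mem_filter.mp hq).2
    simp only [Bool.and_eq_true, beq_iff_eq, decide_eq_true_eq] at hp' hq'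
    obtain ⟨p1, p2⟩ := p; obtain ⟨q1, q2⟩ := q
    simp only at he hp' hq'
    rw [he, hp'.1.1, hq'.1.1]
  have hsub : (F.map Prod.snd).toFinset ⊆ Finset.Ioo s c := by
    intro x hx
    rw [List.mem_toFinset] at hx
    obtain ⟨p, hp, rfl⟩ := List.mem_map.mp hx
    have hp' := (List.mem_filter.mp hp).2
    simp only [Bool.and_eq_true, beq_iff_eq, decide_eq_true_eq] at hp'
    exact Finset.mem_Ioo.mpr ⟨hp'.1.2, hp'.2⟩
  have h1 : F.length = (F.map Prod.snd).length := (List.length_map _).symm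
  have h2 : (F.map Prod.snd).length = (F.map Prod.snd).toFinset.card := (List.toFinset_card_of_nodup hmap).symm
  have h3 := Finset.card_le_card hsub
  rw [Int.card_Ioo] at h3
  omega

lemma mem_pvSq (square_stones : List (Int × Int)) (p : Int × Int) :
    p ∈ pvSq square_stones ↔ p ∈ square_stones := PySem.Set.mem_ofList _ _

lemma mem_pvStones (round_stones square_stones : List (Int × Int)) (rows cols : Int) (r c : Int) :
    (r, c) ∈ pvStones round_stones square_stones rows cols ↔
      (0 ≤ r ∧ r < rows ∧ 0 ≤ c ∧ c < cols ∧ (r, c) ∈ round_stones ∧ (r, c) ∉ square_stones) := by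
  unfold pvStones
  rw [PySem.Set.mem_ofList, List.mem_filter]
  simp only [Bool.and_eq_true, decide_eq_true_eq, Bool.not_eq_true']
  constructor
  · rintro ⟨hm, ⟨⟨⟨⟨h1, h2⟩, h3⟩, h4⟩, h5⟩⟩
    refine ⟨h1, h2, h3, h4, hm, ?_⟩
    intro hsq
    rw [← Bool.not_eq_true, PySem.Set.contains_iff, mem_pvSq] at h5
    exact h5 hsq
  · rintro ⟨h1, h2, h3, h4, hm, hns⟩
    refine ⟨hm, ⟨⟨⟨⟨h1, h2⟩, h3⟩, h4⟩, ?_⟩⟩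
    rw [← Bool.not_eq_true, PySem.Set.contains_iff, mem_pvSq]
    exact hns

lemma pv_indep_fold (g : Int → Int → Int) (h : Int → Int → List (Int × Int)) :
    ∀ (L : List Int), L.Nodup → ∀ (f : Int → Int) (out : List (Int × Int)),
    L.foldl (fun (st : (Int → Int) × List (Int × Int)) row =>
        ((fun r' => if r' = row then g row (st.1 row) else st.1 r'), st.2 ++ h row (st.1 row)))
      (f, out)
    = ((fun r' => if r' ∈ L then g r' (f r') else f r'),
       out ++ L.flatMap (fun row => h row (f row))) := by
  intro L
  induction L with
  | nil => intro _ f out; simp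
  | cons r0 t ih =>
    intro hnd f out
    rw [List.nodup_cons] at hnd
    rw [List.foldl_cons]
    rw [ih hnd.2]
    refine Prod.ext_iff.mpr ⟨?_, ?_⟩
    · funext r'
      by_cases hmem : r' ∈ t
      · have hne : r' ≠ r0 := fun he => hnd.1 (he ▸ hmem)
        simp [hmem, hne, List.mem_cons]
      · by_cases he : r' = r0
        · subst he
          simp [hmem, List.mem_cons]
        · simp [hmem, he, List.mem_cons]
    · simp only [List.flatMap_cons]
      rw [← List.append_assoc]
      congr 1
      apply List.flatMap_congr
      intro row hrow
      have hne : row ≠ r0 := fun he => hnd.1 (he ▸ hrow)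
      simp [hne]

def pvFet (sq stones : List (Int × Int)) (rows c : Int) (r : Int) : Int :=
  if 0 ≤ r ∧ r < rows then
    (if pvK stones r (pvS sq r c) c = c - pvS sq r c - 1 then -1 else pvDest sq stones r c)
  else -1

lemma pvFet_step (round_stones square_stones : List (Int × Int)) (rows cols c : Int)
    (hc : 0 ≤ c) (hcc : c < cols) (r : Int) (hr0 : 0 ≤ r) (hrr : r < rows) :
    pvFet (pvSq square_stones) (pvStones round_stones square_stones rows cols) rows (c + 1) r =
      (if (r, c) ∈ square_stones then -1
       else if (r, c) ∈ round_stones then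
         (if pvFet (pvSq square_stones) (pvStones round_stones square_stones rows cols) rows c r ≠ -1
          then pvFet (pvSq square_stones) (pvStones round_stones square_stones rows cols) rows c r + 1
          else pvFet (pvSq square_stones) (pvStones round_stones square_stones rows cols) rows c r)
       else (if pvFet (pvSq square_stones) (pvStones round_stones square_stones rows cols) rows c r = -1
          then c
          else pvFet (pvSq square_stones) (pvStones round_stones square_stones rows cols) rows c r)) := by
  have hgrid : 0 ≤ r ∧ r < rows := ⟨hr0, hrr⟩
  set sq := pvSq square_stones with hsqdef
  set stn := pvStones round_stones square_stones rows cols with hstndef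
  have hSge := pvS_ge sq r c
  have hSlt := pvS_lt sq r c hc
  have hKnn : (0:Int) ≤ pvK stn r (pvS sq r c) c := by unfold pvK; positivity
  have hKle : pvK stn r (pvS sq r c) c ≤ c - pvS sq r c - 1 :=
    pvK_le stn (PySem.Set.nodup_ofList _) r (pvS sq r c) c hSlt
  rw [pvFet, pvFet, if_pos hgrid, if_pos hgrid]
  by_cases hsq : (r, c) ∈ square_stones
  · rw [if_pos hsq]
    have h1 : pvS sq r (c + 1) = c := pvS_square sq r c ((mem_pvSq square_stones (r, c)).mpr hsq) hc
    rw [h1, pvK_empty]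
    rw [if_pos (show (0:Int) = c + 1 - c - 1 by omega)]
  · have h1 : pvS sq r (c + 1) = pvS sq r c :=
      pvS_skip sq r c (fun hm => hsq ((mem_pvSq square_stones (r, c)).mp hm))
    have hstep := pvK_step stn (PySem.Set.nodup_ofList _) r (pvS sq r c) c hSlt
    rw [if_neg hsq]
    by_cases hrd : (r, c) ∈ round_stones
    · rw [if_pos hrd]
      have hmem : (r, c) ∈ stn :=
        (mem_pvStones round_stones square_stones rows cols r c).mpr ⟨hr0, hrr, hc, hcc, hrd, hsq⟩
      rw [if_pos hmem] at hstep
      by_cases hfull : pvK stn r (pvS sq r c) c = c - pvS sq r c - 1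
      · rw [if_pos hfull]
        rw [h1, hstep]
        rw [if_pos (show pvK stn r (pvS sq r c) c + 1 = c + 1 - pvS sq r c - 1 by omega)]
        simp
      · rw [if_neg hfull]
        have hne : pvDest sq stn r c ≠ -1 := by
          simp only [pvDest]; omega
        rw [h1, hstep]
        rw [if_neg (show ¬(pvK stn r (pvS sq r c) c + 1 = c + 1 - pvS sq r c - 1) by omega)]
        rw [if_pos hne]
        simp only [pvDest]
        rw [h1, hstep]
        ring
    · rw [if_neg hrd]
      have hmem : (r, c) ∉ stn := fun hm =>
        hrd ((mem_pvStones round_stones square_stones rows cols r c).mp hm).2.2.2.2.1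
      rw [if_neg hmem] at hstep
      by_cases hfull : pvK stn r (pvS sq r c) c = c - pvS sq r c - 1
      · rw [if_pos hfull]
        rw [h1, hstep]
        rw [if_neg (show ¬(pvK stn r (pvS sq r c) c + 0 = c + 1 - pvS sq r c - 1) by omega)]
        rw [if_pos rfl]
        simp only [pvDest]
        rw [h1, hstep]
        omega
      · rw [if_neg hfull]
        have hne : pvDest sq stn r c ≠ -1 := by
          simp only [pvDest]; omega
        rw [h1, hstep]
        rw [if_neg (show ¬(pvK stn r (pvS sq r c) c + 0 = c + 1 - pvS sq r c - 1) by omega)]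
        rw [if_neg hne]
        simp only [pvDest]
        rw [h1, hstep]
        ring

def pvG (round_stones square_stones : List (Int × Int)) (c : Int) (row v : Int) : Int :=
  if (row, c) ∈ square_stones then -1
  else if (row, c) ∈ round_stones then (if v ≠ -1 then v + 1 else v)
  else (if v = -1 then c else v)

def pvH (round_stones square_stones : List (Int × Int)) (c : Int) (row v : Int) : List (Int × Int) :=
  if (row, c) ∈ square_stones then []
  else if (row, c) ∈ round_stones then (if v ≠ -1 then [(row, v)] else [(row, c)])
  else []

lemma pvStepA_shape (round_stones square_stones : List (Int × Int)) (c : Int) :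
    pvStepA round_stones square_stones c = (fun st row =>
      ((fun r' => if r' = row then pvG round_stones square_stones c row (st.1 row) else st.1 r'),
        st.2 ++ pvH round_stones square_stones c row (st.1 row))) := by
  funext st row
  unfold pvStepA pvG pvH
  by_cases h1 : (row, c) ∈ square_stones
  · simp only [if_pos h1, List.append_nil]
  · rw [if_neg h1, if_neg h1, if_neg h1]
    by_cases h2 : (row, c) ∈ round_stones
    · rw [if_pos h2, if_pos h2, if_pos h2]
      by_cases h3 : st.1 row ≠ -1
      · rw [if_pos h3, if_pos h3, if_pos h3]
      · rw [if_neg h3, if_neg h3, if_neg h3]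
        refine Prod.ext_iff.mpr ⟨?_, rfl⟩
        funext r'
        by_cases h4 : r' = row
        · subst h4; simp
        · simp [h4]
    · rw [if_neg h2, if_neg h2, if_neg h2]
      by_cases h3 : st.1 row = -1
      · rw [if_pos h3, if_pos h3, List.append_nil]
      · rw [if_neg h3, if_neg h3, List.append_nil]
        refine Prod.ext_iff.mpr ⟨?_, rfl⟩
        funext r'
        by_cases h4 : r' = row
        · subst h4; simp
        · simp [h4]

lemma pv_flatMap_ite (L : List Int) (p : Int → Prop) [DecidablePred p] (q : Int → Int × Int) :
    L.flatMap (fun r => if p r then [q r] else []) = (L.filter (fun r => decide (p r))).map q := by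
  induction L with
  | nil => rfl
  | cons a t ih =>
    rw [List.flatMap_cons, List.filter_cons, ih]
    by_cases h : p a
    · rw [if_pos h, if_pos (by simpa using h)]
      rfl
    · rw [if_neg h, if_neg (by simpa using h)]
      rfl

lemma pv_inner (round_stones square_stones : List (Int × Int)) (rows cols c : Int)
    (hc : 0 ≤ c) (hcc : c < cols) (out : List (Int × Int)) :
    (PySem.List.pyRange 0 rows).foldl (pvStepA round_stones square_stones c)
      (pvFet (pvSq square_stones) (pvStones round_stones square_stones rows cols) rows c, out)
    = (pvFet (pvSq square_stones) (pvStones round_stones square_stones rows cols) rows (c + 1),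
       out ++ ((PySem.List.pyRange 0 rows).filter
          (fun r => decide ((r, c) ∈ pvStones round_stones square_stones rows cols))).map
        (fun r => (r, pvDest (pvSq square_stones) (pvStones round_stones square_stones rows cols) r c))) := by
  set sq := pvSq square_stones
  set stn := pvStones round_stones square_stones rows cols
  rw [pvStepA_shape]
  rw [pv_indep_fold (pvG round_stones square_stones c) (pvH round_stones square_stones c)
    (PySem.List.pyRange 0 rows) (PySem.List.nodup_pyRange_one 0 rows)]
  refine Prod.ext_iff.mpr ⟨?_, ?_⟩
  · dsimp only
    funext r'
    by_cases hmem : r' ∈ PySem.List.pyRange 0 rows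
    · rw [if_pos hmem]
      obtain ⟨hr0, hrr⟩ := PySem.List.mem_pyRange_one.mp hmem
      rw [pvFet_step round_stones square_stones rows cols c hc hcc r' hr0 hrr]
      rfl
    · rw [if_neg hmem]
      have hnot : ¬(0 ≤ r' ∧ r' < rows) := fun hco => hmem (PySem.List.mem_pyRange_one.mpr hco)
      simp only [pvFet, if_neg hnot]
  · dsimp only
    congr 1
    rw [← pv_flatMap_ite (PySem.List.pyRange 0 rows) (fun r => (r, c) ∈ stn)
      (fun r => (r, pvDest sq stn r c))]
    apply List.flatMap_congr
    intro row hrow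
    obtain ⟨hr0, hrr⟩ := PySem.List.mem_pyRange_one.mp hrow
    unfold pvH
    by_cases hsq : (row, c) ∈ square_stones
    · rw [if_pos hsq]
      rw [if_neg (fun hm => ((mem_pvStones round_stones square_stones rows cols row c).mp hm).2.2.2.2.2 hsq)]
    · rw [if_neg hsq]
      by_cases hrd : (row, c) ∈ round_stones
      · rw [if_pos hrd]
        have hmem : (row, c) ∈ stn :=
          (mem_pvStones round_stones square_stones rows cols row c).mpr ⟨hr0, hrr, hc, hcc, hrd, hsq⟩
        rw [if_pos hmem]
        have hgrid : 0 ≤ row ∧ row < rows := ⟨hr0, hrr⟩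
        have hSge := pvS_ge sq row c
        have hKnn : (0:Int) ≤ pvK stn row (pvS sq row c) c := by unfold pvK; positivity
        simp only [pvFet, if_pos hgrid]
        by_cases hfull : pvK stn row (pvS sq row c) c = c - pvS sq row c - 1
        · rw [if_pos hfull]
          simp only [ne_eq, not_true_eq_false, if_false]
          have : pvDest sq stn row c = c := by
            simp only [pvDest]; omega
          rw [this]
        · rw [if_neg hfull]
          rw [if_pos (show pvDest sq stn row c ≠ -1 by simp only [pvDest]; omega)]
      · rw [if_neg hrd]
        rw [if_neg (fun hm => hrd ((mem_pvStones round_stones square_stones rows cols row c).mp hm).2.2.2.2.1)]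

def pvOut (round_stones square_stones : List (Int × Int)) (rows cols c : Int) : List (Int × Int) :=
  (PySem.List.pyRange 0 c).flatMap (fun c' =>
    ((PySem.List.pyRange 0 rows).filter
        (fun r => decide ((r, c') ∈ pvStones round_stones square_stones rows cols))).map
      (fun r => (r, pvDest (pvSq square_stones) (pvStones round_stones square_stones rows cols) r c')))

lemma pvS_zero (l : List (Int × Int)) (r : Int) : pvS l r 0 = -1 := by
  rcases (pvS_spec l r 0).1 with h | h
  · exact h
  · omega

lemma pv_outer (round_stones square_stones : List (Int × Int)) (rows cols : Int) :
    ∀ (c : Int) (hc : 0 ≤ c), c ≤ cols →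
    (PySem.List.pyRange 0 c).foldl
      (fun st col => (PySem.List.pyRange 0 rows).foldl (pvStepA round_stones square_stones col) st)
      ((fun _ => -1), [])
    = (pvFet (pvSq square_stones) (pvStones round_stones square_stones rows cols) rows c,
       pvOut round_stones square_stones rows cols c) := by
  intro c hc
  induction c, hc using Int.le_induction with
  | base =>
    intro _
    have h0 : PySem.List.pyRange 0 0 = [] := rfl
    rw [h0]
    unfold pvOut
    rw [h0, List.flatMap_nil, List.foldl_nil]
    refine Prod.ext_iff.mpr ⟨?_, rfl⟩
    funext r
    simp only [pvFet]
    by_cases hg : 0 ≤ r ∧ r < rows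
    · rw [if_pos hg, pvS_zero]
      rw [if_pos (by rw [show (0:Int) = -1 + 1 by omega, pvK_empty]; omega)]
    · rw [if_neg hg]
  | succ c hc ih =>
    intro hcc
    have hclt : c < cols := by omega
    rw [PySem.List.pyRange_one_succ_right hc, List.foldl_append, ih (by omega),
      List.foldl_cons, List.foldl_nil, pv_inner round_stones square_stones rows cols c hc hclt]
    unfold pvOut
    rw [PySem.List.pyRange_one_succ_right hc, List.flatMap_append, List.flatMap_cons,
      List.flatMap_nil, List.append_nil]


lemma pv_pairwiseE (round_stones square_stones : List (Int × Int)) (rows cols : Int) :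
    ((PySem.List.pyRange 0 cols).flatMap (fun c =>
        ((PySem.List.pyRange 0 rows).filter
            (fun r => decide ((r, c) ∈ pvStones round_stones square_stones rows cols))).map
          (fun r => (c, r)))).Pairwise
      (fun a b => toLex ((a : Int × Int).1, a.2) < toLex ((b : Int × Int).1, b.2)) := by
  rw [List.flatMap_def, List.pairwise_flatten]
  constructor
  · intro l hl
    rw [List.mem_map] at hl
    obtain ⟨c, hc, rfl⟩ := hl
    rw [List.pairwise_map]
    refine List.Pairwise.imp ?_ ((PySem.List.pairwise_lt_pyRange_one 0 rows).filter _)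
    intro r1 r2 h
    rw [Prod.Lex.toLex_lt_toLex]
    right
    exact ⟨rfl, h⟩
  · rw [List.pairwise_map]
    refine List.Pairwise.imp ?_ (PySem.List.pairwise_lt_pyRange_one 0 cols)
    intro c1 c2 h
    intro x hx y hy
    rw [List.mem_map] at hx hy
    obtain ⟨r1, _, rfl⟩ := hx
    obtain ⟨r2, _, rfl⟩ := hy
    rw [Prod.Lex.toLex_lt_toLex]
    left
    exact h

lemma pv_sorted_enum (round_stones square_stones : List (Int × Int)) (rows cols : Int) :
    PySem.List.sorted2 ((pvStones round_stones square_stones rows cols).map (fun p => (p.2, p.1)))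
      (fun q => q.1) (fun q => q.2)
    = (PySem.List.pyRange 0 cols).flatMap (fun c =>
        ((PySem.List.pyRange 0 rows).filter
            (fun r => decide ((r, c) ∈ pvStones round_stones square_stones rows cols))).map
          (fun r => (c, r))) := by
  set stn := pvStones round_stones square_stones rows cols with hstn
  -- Python's tuple sort is the sort by the lexicographic key
  have hkey : PySem.List.sorted2 (stn.map (fun p => (p.2, p.1))) (fun q => q.1) (fun q => q.2)
      = PySem.List.sorted (stn.map (fun p => (p.2, p.1)))
          (fun q => toLex ((q : Int × Int).1, q.2)) := by
    simp only [PySem.List.sorted2, PySem.List.sorted]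
    have hb : (fun (a b : Int × Int) => decide (a.1 < b.1) || !decide (b.1 < a.1) && decide (a.2 < b.2))
        = (fun (a b : Int × Int) => decide (toLex (a.1, a.2) < toLex (b.1, b.2))) := by
      funext a b
      rcases lt_trichotomy a.1 b.1 with h | h | h
      · simp [h, Prod.Lex.toLex_lt_toLex, not_lt.mpr (le_of_lt h)]
      · simp [h, Prod.Lex.toLex_lt_toLex, lt_irrefl]
      · simp [h, Prod.Lex.toLex_lt_toLex, not_lt.mpr (le_of_lt h), lt_asymm h, ne_of_gt h]
    rw [hb]
    norm_num
  rw [hkey]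
  apply PySem.List.sorted_eq_of_perm_of_pairwise_lt (key := fun q => toLex ((q : Int × Int).1, q.2))
  · -- permutation: same elements, both lists without duplicates
    have hpwE : ((PySem.List.pyRange 0 cols).flatMap (fun c =>
        ((PySem.List.pyRange 0 rows).filter (fun r => decide ((r, c) ∈ stn))).map
          (fun r => (c, r)))).Pairwise
        (fun a b => toLex ((a : Int × Int).1, a.2) < toLex ((b : Int × Int).1, b.2)) := pv_pairwiseE round_stones square_stones rows cols
    have hndE : ((PySem.List.pyRange 0 cols).flatMap (fun c =>
        ((PySem.List.pyRange 0 rows).filter (fun r => decide ((r, c) ∈ stn))).map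
          (fun r => (c, r)))).Nodup := by
      refine List.Pairwise.imp ?_ hpwE
      intro a b h he
      rw [he] at h
      exact lt_irrefl _ h
    have hndM : ((stn.map (fun p => (p.2, p.1))) : List (Int × Int)).Nodup := by
      refine List.Nodup.map ?_ (PySem.Set.nodup_ofList _)
      intro p q he
      obtain ⟨p1, p2⟩ := p; obtain ⟨q1, q2⟩ := q
      obtain ⟨h1, h2⟩ := Prod.mk.injEq .. ▸ he
      simp only at h1 h2
      rw [h1, h2]
    rw [List.perm_ext_iff_of_nodup hndE hndM]
    intro q
    obtain ⟨c, r⟩ := q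
    rw [List.mem_flatMap, List.mem_map]
    constructor
    · rintro ⟨c', hc', hmem⟩
      rw [List.mem_map] at hmem
      obtain ⟨r', hr', he⟩ := hmem
      obtain ⟨he1, he2⟩ := Prod.mk.injEq .. ▸ he
      subst he1; subst he2
      have := (List.mem_filter.mp hr').2
      rw [decide_eq_true_eq] at this
      exact ⟨(r', c'), this, rfl⟩
    · rintro ⟨p, hp, he⟩
      obtain ⟨p1, p2⟩ := p
      obtain ⟨he1, he2⟩ := Prod.mk.injEq .. ▸ he
      simp only at he1 he2
      subst he1; subst he2
      have hb := (mem_pvStones round_stones square_stones rows cols p1 p2).mp hp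
      refine ⟨p2, PySem.List.mem_pyRange_one.mpr ⟨hb.2.2.1, hb.2.2.2.1⟩, ?_⟩
      rw [List.mem_map]
      exact ⟨p1, List.mem_filter.mpr ⟨PySem.List.mem_pyRange_one.mpr ⟨hb.1, hb.2.1⟩,
        decide_eq_true hp⟩, rfl⟩
  · exact pv_pairwiseE round_stones square_stones rows cols


-- ===== VERDICT (by name: the statement is the Claim_ definition above) =====
theorem move_stones_west_spec : Claim_equal_move_stones_west := by
  intro round_stones square_stones rows cols _
  unfold Spec_move_stones_west
  rcases le_or_gt 0 cols with hc | hc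
  · rw [move_stones_west, pv_outer round_stones square_stones rows cols cols hc le_rfl]
    rw [move_stones_west_alt, pv_sorted_enum]
    simp [pvOut, List.map_flatMap, List.map_map, Function.comp_def]
  · have h1 : PySem.List.pyRange 0 cols = [] := by
      simp only [PySem.List.pyRange]
      norm_num
      omega
    have h2 : round_stones.filter (fun p =>
        decide (0 ≤ p.1) && decide (p.1 < rows) && decide (0 ≤ p.2) && decide (p.2 < cols) &&
        !(PySem.Set.contains (pvSq square_stones) p)) = [] := by
      rw [List.filter_eq_nil_iff]
      intro p _ hcon
      simp only [Bool.and_eq_true, decide_eq_true_eq] at hcon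
      omega
    rw [move_stones_west, h1, List.foldl_nil]
    rw [move_stones_west_alt, pvStones, h2]
    rfl
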